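-- pv_equiv track=rewrite | github.com/scieloorg/PC-Programs | src/scielo/bin/xml/modules/validations/package_validations.py | number_after_words
-- ===== SOURCE A (Python) =====
-- def number_after_words(content, text='Total of errors = '):
--     n = 0
--     if text in content:
--         content = content[content.find(text) + len(text):]
--         finished = False
--         n = ''
--         while not finished and len(content) > 0:
--             if content[0].isdigit():
--                 n += content[0]
--                 content = content[1:]
--             else:
--                 finished = True
--
--         if len(n) > 0:
--             n = int(n)
--         else:
--             n = 0
--     return n
-- ===== SOURCE B (Python) =====
-- _DIGITS = '0123456789'
--
-- def number_after_words(content, text='Total of errors = '):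
--     i = content.find(text)
--     if i == -1:
--         return 0
--     rest = content[i + len(text):]
--     stripped = rest.lstrip(_DIGITS)
--     digits = rest[:len(rest) - len(stripped)]
--     return int(digits) if digits else 0
-- ===== Notes on version B (the rewrite author's own statement) =====
-- stated objective: idiomatic
-- what changed: Replaces A's flag-driven while loop that accumulates digit characters one by one with library calls only: str.find to locate the marker, slicing, and str.lstrip with the ten digit characters to measure the maximal digit run, with no explicit loop.
import Mathlib
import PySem

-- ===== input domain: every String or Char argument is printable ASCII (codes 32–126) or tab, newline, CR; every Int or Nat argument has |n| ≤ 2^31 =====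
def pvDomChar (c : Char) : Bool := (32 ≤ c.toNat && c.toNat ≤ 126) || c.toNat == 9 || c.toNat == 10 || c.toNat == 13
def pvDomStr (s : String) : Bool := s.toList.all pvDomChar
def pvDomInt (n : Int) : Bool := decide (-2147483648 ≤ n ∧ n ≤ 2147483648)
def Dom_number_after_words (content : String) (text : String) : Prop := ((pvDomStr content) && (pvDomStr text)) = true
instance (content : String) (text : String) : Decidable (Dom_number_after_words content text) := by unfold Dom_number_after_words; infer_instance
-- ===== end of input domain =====

-- B replaces A's flag-driven character-accumulation loop by find/slice/lstrip library calls
-- (no explicit scanning loop); objective: simpler/idiomatic, not faster.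

-- ===== PORT A =====
-- A's while loop: accumulate leading digit characters of `content` into n, stop at the first
-- non-digit (or end of string).
def pvScanA : List Char → List Char → List Char
  | acc, [] => acc
  | acc, c :: rest => if PySem.Chars.isdigit c then pvScanA (acc ++ [c]) rest else acc

def number_after_words (content : String) (text : String) : Int :=
  if PySem.Str.isIn text content then
    let rest := PySem.List.slice content.toList
      (some (PySem.Str.find content text + PySem.Str.len text)) none
    let n := pvScanA [] rest
    if 0 < n.length then
      (PySem.Int.ofChars? n).getD 0   -- int(n): n is a nonempty run of ASCII digits, never raises
    else 0
  else 0

-- ===== PORT B =====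
def pvDigitChars : List Char := ['0','1','2','3','4','5','6','7','8','9']

def number_after_words_alt (content : String) (text : String) : Int :=
  let i := PySem.Str.find content text
  if i == -1 then 0
  else
    let rest := PySem.List.slice content.toList (some (i + PySem.Str.len text)) none
    -- rest.lstrip(_DIGITS): drop the maximal leading run of characters from _DIGITS (exact)
    let stripped := rest.dropWhile (fun c => pvDigitChars.contains c)
    -- rest[:len(rest) - len(stripped)] with 0 ≤ bound ≤ len rest is exactly List.take
    let digits := rest.take (rest.length - stripped.length)
    if digits.isEmpty then 0
    else (PySem.Int.ofChars? digits).getD 0   -- int(digits): nonempty digit run, never raises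

-- ===== PRECONDITION & SPEC =====
def Spec_number_after_words (content : String) (text : String) (out : Int) : Prop := out = number_after_words_alt content text
instance (content : String) (text : String) (out : Int) : Decidable (Spec_number_after_words content text out) := by unfold Spec_number_after_words; infer_instance

-- ===== CLAIM (what is proved, stated in full; the proofs are below) =====
def Claim_equal_number_after_words : Prop := ∀ (content : String) (text : String), Dom_number_after_words content text → Spec_number_after_words content text (number_after_words content text)

-- ===== LEMMAS AND PROOFS =====

theorem pvCharEq (c d : Char) (h : c.toNat = d.toNat) : c = d := Char.ext (UInt32.toNat_inj.mp h)

theorem pvMemDigits_eq_isdigit (c : Char) :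
    pvDigitChars.contains c = PySem.Chars.isdigit c := by
  rw [Bool.eq_iff_iff]
  simp only [pvDigitChars, List.contains_eq_mem, decide_eq_true_eq, PySem.Chars.isdigit,
    Bool.and_eq_true, List.mem_cons, List.not_mem_nil, or_false]
  constructor
  · rintro (rfl|rfl|rfl|rfl|rfl|rfl|rfl|rfl|rfl|rfl) <;> exact ⟨by decide, by decide⟩
  · rintro ⟨h1, h2⟩
    have hn1 : 48 ≤ c.toNat := by simpa [Char.le_def, UInt32.le_iff_toNat_le] using h1
    have hn2 : c.toNat ≤ 57 := by simpa [Char.le_def, UInt32.le_iff_toNat_le] using h2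
    have h3 : c.toNat = 48 ∨ c.toNat = 49 ∨ c.toNat = 50 ∨ c.toNat = 51 ∨ c.toNat = 52 ∨
        c.toNat = 53 ∨ c.toNat = 54 ∨ c.toNat = 55 ∨ c.toNat = 56 ∨ c.toNat = 57 := by omega
    rcases h3 with h|h|h|h|h|h|h|h|h|h
    exacts [Or.inl (pvCharEq c '0' h), Or.inr (Or.inl (pvCharEq c '1' h)),
      Or.inr (Or.inr (Or.inl (pvCharEq c '2' h))),
      Or.inr (Or.inr (Or.inr (Or.inl (pvCharEq c '3' h)))),
      Or.inr (Or.inr (Or.inr (Or.inr (Or.inl (pvCharEq c '4' h))))),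
      Or.inr (Or.inr (Or.inr (Or.inr (Or.inr (Or.inl (pvCharEq c '5' h)))))),
      Or.inr (Or.inr (Or.inr (Or.inr (Or.inr (Or.inr (Or.inl (pvCharEq c '6' h))))))),
      Or.inr (Or.inr (Or.inr (Or.inr (Or.inr (Or.inr (Or.inr (Or.inl (pvCharEq c '7' h)))))))),
      Or.inr (Or.inr (Or.inr (Or.inr (Or.inr (Or.inr (Or.inr (Or.inr (Or.inl (pvCharEq c '8' h))))))))),
      Or.inr (Or.inr (Or.inr (Or.inr (Or.inr (Or.inr (Or.inr (Or.inr (Or.inr (pvCharEq c '9' h)))))))))]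

theorem pvScanA_eq_takeWhile (xs acc : List Char) :
    pvScanA acc xs = acc ++ xs.takeWhile PySem.Chars.isdigit := by
  induction xs generalizing acc with
  | nil => simp [pvScanA]
  | cons c rest ih =>
    simp only [pvScanA, List.takeWhile_cons]
    by_cases h : PySem.Chars.isdigit c
    · simp [h, ih]
    · simp [h]

theorem pvTake_sub_dropWhile (p : Char → Bool) (xs : List Char) :
    xs.take (xs.length - (xs.dropWhile p).length) = xs.takeWhile p := by
  have hx : xs = xs.takeWhile p ++ xs.dropWhile p := (List.takeWhile_append_dropWhile).symm
  have hlen : xs.length = (xs.takeWhile p).length + (xs.dropWhile p).length := by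
    conv_lhs => rw [hx]
    exact List.length_append
  rw [show xs.length - (xs.dropWhile p).length = (xs.takeWhile p).length by omega]
  calc xs.take (xs.takeWhile p).length
      = (xs.takeWhile p ++ xs.dropWhile p).take (xs.takeWhile p).length := by
        rw [List.takeWhile_append_dropWhile]
    _ = xs.takeWhile p := List.take_left

-- ===== VERDICT (by name: the statement is the Claim_ definition above) =====
theorem number_after_words_spec : Claim_equal_number_after_words := by
  intro content text _
  unfold Spec_number_after_words number_after_words number_after_words_alt
  by_cases hin : PySem.Str.isIn text content = true
  · have hfind : ¬ (PySem.Str.find content text == -1) = true := by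
      simp only [PySem.Str.find_eq, beq_iff_eq, PySem.Chars.find_eq_neg_one_iff, not_not]
      rw [PySem.Str.isIn_eq, PySem.Chars.isIn_iff_infix] at hin
      exact hin
    simp only [hin, if_true, hfind]
    have hsame : pvScanA [] (PySem.List.slice content.toList
        (some (PySem.Str.find content text + PySem.Str.len text)) none) =
        (PySem.List.slice content.toList
          (some (PySem.Str.find content text + PySem.Str.len text)) none).take
        ((PySem.List.slice content.toList
          (some (PySem.Str.find content text + PySem.Str.len text)) none).length -
         ((PySem.List.slice content.toList
          (some (PySem.Str.find content text + PySem.Str.len text)) none).dropWhile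
            (fun c => pvDigitChars.contains c)).length) := by
      rw [pvScanA_eq_takeWhile, List.nil_append]
      rw [show (fun c => pvDigitChars.contains c) = PySem.Chars.isdigit from
        funext fun c => pvMemDigits_eq_isdigit c]
      rw [pvTake_sub_dropWhile]
    rw [← hsame]
    rcases h : pvScanA [] (PySem.List.slice content.toList
        (some (PySem.Str.find content text + PySem.Str.len text)) none) with _ | ⟨c, cs⟩
    · simp
    · simp
  · have h1 : PySem.Chars.isIn text.toList content.toList = false := by
      rw [PySem.Str.isIn_eq] at hin
      simpa using hin
    have h2 : PySem.Chars.find content.toList text.toList = -1 := by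
      rw [PySem.Chars.find_eq_neg_one_iff, ← PySem.Chars.isIn_iff_infix]
      simp [h1]
    simp [h1, h2]
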